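-- pv_equiv track=rewrite | github.com/Rahwbahwdawhb/Advent-of-Code | AOC-2024/Day 21/Day21.py | get_count_dict
-- ===== SOURCE A (Python) =====
-- def get_count_dict(check_str): #generate a dict from 4. from an input string
--     count_dict=dict()
--     for _str in check_str.split('A')[1:-1]:
--         A_str=f"A{_str}A"
--         try:
--             count_dict[A_str]+=1
--         except:
--             count_dict[A_str]=1
--     return count_dict
-- ===== SOURCE B (Python) =====
-- def get_count_dict(check_str):
--     a_positions = [i for i, ch in enumerate(check_str) if ch == 'A']
--     count_dict = {}
--     for i, j in zip(a_positions, a_positions[1:]):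
--         seg = check_str[i:j + 1]
--         count_dict[seg] = count_dict.get(seg, 0) + 1
--     return count_dict
-- ===== Notes on version B (the rewrite author's own statement) =====
-- stated objective: alternative
-- what changed: B scans the string once for the positions of the delimiter character, pairs consecutive positions and counts the inclusive slices between them, instead of splitting on the delimiter, dropping the outer parts and re-wrapping each inner fragment with the delimiter on both sides.
import Mathlib
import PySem

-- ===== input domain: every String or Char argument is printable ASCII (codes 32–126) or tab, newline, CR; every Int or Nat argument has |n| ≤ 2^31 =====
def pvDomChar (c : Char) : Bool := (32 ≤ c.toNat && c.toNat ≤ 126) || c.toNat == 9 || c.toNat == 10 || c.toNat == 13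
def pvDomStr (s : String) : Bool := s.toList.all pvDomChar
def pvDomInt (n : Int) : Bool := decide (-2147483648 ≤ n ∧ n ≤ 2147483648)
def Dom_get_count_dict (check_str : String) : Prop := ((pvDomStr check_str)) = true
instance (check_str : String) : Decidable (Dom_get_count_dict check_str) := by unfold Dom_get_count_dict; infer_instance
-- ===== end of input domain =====

-- B counts the same 'A'-delimited segments by pairing consecutive 'A' positions and slicing,
-- instead of splitting on 'A' and re-wrapping the inner fragments ('alternative' decomposition, same cost).

-- ===== PORT A =====
def get_count_dict (check_str : String) : List (String × Int) :=
  let parts := (PySem.Str.split? check_str "A").getD []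
  let mid := PySem.List.slice parts (some 1) (some (-1))
  (mid.foldl (fun count_dict _str =>
      let A_str := "A" ++ _str ++ "A"
      match count_dict.get? A_str with
      | some v => count_dict.insert A_str (v + 1)
      | none => count_dict.insert A_str 1) PySem.Dict.empty).items

-- ===== PORT B =====
def get_count_dict_alt (check_str : String) : List (String × Int) :=
  let a_positions := ((PySem.List.enumerate check_str.toList 0).filter (fun p => p.2 == 'A')).map (·.1)
  let pairs := a_positions.zip (PySem.List.slice a_positions (some 1) none)
  (pairs.foldl (fun count_dict p =>
      let seg := PySem.Str.slice check_str (some p.1) (some (p.2 + 1))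
      count_dict.insert seg (count_dict.getD seg 0 + 1)) PySem.Dict.empty).items

-- ===== PRECONDITION & SPEC =====
def Spec_get_count_dict (check_str : String) (out : List (String × Int)) : Prop := out = get_count_dict_alt check_str
instance (check_str : String) (out : List (String × Int)) : Decidable (Spec_get_count_dict check_str out) := by unfold Spec_get_count_dict; infer_instance

-- ===== CLAIM (what is proved, stated in full; the proofs are below) =====
def Claim_equal_get_count_dict : Prop := ∀ (check_str : String), Dom_get_count_dict check_str → Spec_get_count_dict check_str (get_count_dict check_str)

-- ===== LEMMAS AND PROOFS =====

-- proof-side model of str.split('A') (the accumulator form of Chars.splitOn)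
def fSplit : List Char → List Char → List (List Char)
  | [], cur => [cur.reverse]
  | c :: rest, cur => if c = 'A' then cur.reverse :: fSplit rest [] else fSplit rest (c :: cur)

-- proof-side model of the list of 'A'-positions
def posA : List Char → List Nat
  | [] => []
  | c :: l => if c = 'A' then 0 :: (posA l).map (· + 1) else (posA l).map (· + 1)

def wrapC (p : List Char) : List Char := 'A' :: p ++ ['A']

-- the char-level segment list B computes
def segsOf (s : List Char) : List (List Char) :=
  ((posA s).zip (posA s).tail).map (fun p => ((s.drop p.1).take (p.2 + 1 - p.1)))

lemma go_single (fuel : Nat) : ∀ (l cur : List Char) (acc : List (List Char)), l.length < fuel →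
    PySem.Chars.splitOn.go ['A'] fuel l cur acc = acc.reverse ++ fSplit l cur := by
  induction fuel with
  | zero => intro l cur acc h; omega
  | succ fuel ih =>
    intro l cur acc h
    cases l with
    | nil => rw [PySem.Chars.splitOn.go.eq_def]; simp [fSplit]
    | cons c rest =>
      rw [PySem.Chars.splitOn.go.eq_def]
      by_cases hc : c = 'A'
      · have hp : (['A'] : List Char).isPrefixOf (c :: rest) = true := by
          simp [List.isPrefixOf, hc]
        simp only [hp, if_true, List.length_cons, List.length_nil, List.drop_succ_cons,
          List.drop_zero, Nat.zero_add]
        rw [ih rest [] (cur.reverse :: acc) (by simp at h; omega)]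
        simp [fSplit, hc]
      · have hp : (['A'] : List Char).isPrefixOf (c :: rest) = false := by
          simp [List.isPrefixOf]
          exact fun hh => hc hh.symm
        simp only [hp, Bool.false_eq_true, if_false]
        rw [ih rest (c :: cur) acc (by simp at h; omega)]
        simp [fSplit, hc]


lemma splitOn_eq_fSplit (l : List Char) : PySem.Chars.splitOn l ['A'] = fSplit l [] := by
  have : PySem.Chars.splitOn l ['A'] = PySem.Chars.splitOn.go ['A'] (l.length + 1) l [] [] := rfl
  rw [this, go_single (l.length + 1) l [] [] (by omega)]
  simp


lemma fSplit_ne_nil : ∀ (l cur : List Char), fSplit l cur ≠ [] := by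
  intro l
  induction l with
  | nil => intro cur; simp [fSplit]
  | cons c rest ih =>
    intro cur
    by_cases hc : c = 'A'
    · simp only [fSplit, hc, if_true]
      simp
    · simp only [fSplit, hc, if_false]
      exact ih _


lemma fSplit_nofree (l : List Char) (h : 'A' ∉ l) : ∀ cur, fSplit l cur = [cur.reverse ++ l] := by
  induction l with
  | nil => intro cur; simp [fSplit]
  | cons c rest ih =>
    intro cur
    have hc : c ≠ 'A' := fun hh => h (hh ▸ List.mem_cons_self)
    have hr : 'A' ∉ rest := fun hh => h (List.mem_cons_of_mem _ hh)
    simp [fSplit, hc, ih hr]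


lemma fSplit_free (frag : List Char) (h : 'A' ∉ frag) (r : List Char) :
    ∀ cur, fSplit (frag ++ 'A' :: r) cur = (cur.reverse ++ frag) :: fSplit r [] := by
  induction frag with
  | nil => intro cur; simp [fSplit]
  | cons c rest ih =>
    intro cur
    have hc : c ≠ 'A' := fun hh => h (hh ▸ List.mem_cons_self)
    have hr : 'A' ∉ rest := fun hh => h (List.mem_cons_of_mem _ hh)
    simp [fSplit, hc, ih hr]


lemma split_at_A : ∀ (l : List Char), 'A' ∈ l → ∃ frag r, l = frag ++ 'A' :: r ∧ 'A' ∉ frag := by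
  intro l
  induction l with
  | nil => intro h; simp at h
  | cons c rest ih =>
    intro h
    by_cases hc : c = 'A'
    · exact ⟨[], rest, by simp [hc], by simp⟩
    · have : 'A' ∈ rest := by
        rcases List.mem_cons.mp h with h1 | h1
        · exact absurd h1.symm hc
        · exact h1
      obtain ⟨frag, r, hfr, hnf⟩ := ih this
      exact ⟨c :: frag, r, by simp [hfr], by simp [hnf]; exact fun hh => hc hh.symm⟩


lemma posA_free_append (frag : List Char) (h : 'A' ∉ frag) (t : List Char) :
    posA (frag ++ t) = (posA t).map (· + frag.length) := by
  induction frag with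
  | nil => simp
  | cons c rest ih =>
    have hc : c ≠ 'A' := fun hh => h (hh ▸ List.mem_cons_self)
    have hr : 'A' ∉ rest := fun hh => h (List.mem_cons_of_mem _ hh)
    simp only [List.cons_append, posA, hc, if_false, ih hr, List.map_map]
    apply List.map_congr_left
    intro a _
    simp
    omega


lemma posA_eq_nil (l : List Char) (h : 'A' ∉ l) : posA l = [] := by
  have := posA_free_append l h []
  simpa [posA] using this


lemma zip_shift (xs : List Nat) (k : Nat) (s : List Char) :
    (((xs.map (· + k)).zip (xs.map (· + k)).tail).map (fun p => ((s.drop p.1).take (p.2 + 1 - p.1))))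
    = ((xs.zip xs.tail).map (fun p => (((s.drop k).drop p.1).take (p.2 + 1 - p.1)))) := by
  rw [← List.map_tail, List.zip_map, List.map_map]
  apply List.map_congr_left
  intro p _
  simp only [Function.comp_apply, Prod.map, List.drop_drop]
  have h1 : p.1 + k + (p.2 + k + 1 - (p.1 + k)) = p.1 + k + (p.2 + 1 - p.1) := by omega
  rw [show p.1 + k = k + p.1 from Nat.add_comm _ _]
  congr 1
  omega


lemma segsOf_free_append (frag : List Char) (h : 'A' ∉ frag) (t : List Char) :
    segsOf (frag ++ t) = segsOf t := by
  unfold segsOf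
  rw [posA_free_append frag h t, zip_shift, List.drop_left' rfl]


lemma zip_zero_cons (y : Nat) (T : List Nat) :
    ((0 :: y :: T).zip (y :: T)) = (0, y) :: ((y :: T).zip (y :: T).tail) := by
  simp [List.zip_cons_cons]

lemma ahead (n : Nat) : ∀ (l : List Char), l.length ≤ n →
    ((fSplit l []).dropLast).map wrapC = segsOf ('A' :: l) := by
  induction n with
  | zero =>
    intro l hl
    have hnil : l = [] := List.eq_nil_of_length_eq_zero (Nat.le_zero.mp hl)
    subst hnil
    simp [fSplit, segsOf, posA]
  | succ n ihn =>
    intro l hl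
    by_cases hA : 'A' ∈ l
    · obtain ⟨frag, r, rfl, hnf⟩ := split_at_A l hA
      rw [fSplit_free frag hnf r []]
      simp only [List.reverse_nil, List.nil_append]
      rw [List.dropLast_cons_of_ne_nil (fSplit_ne_nil r []), List.map_cons]
      have hr : r.length ≤ n := by
        simp only [List.length_append, List.length_cons] at hl
        omega
      rw [ihn r hr]
      have hX : posA ('A' :: r) = 0 :: (posA r).map (· + 1) := by simp [posA]
      have hpos : posA ('A' :: (frag ++ 'A' :: r))
          = 0 :: ((posA ('A' :: r)).map (· + (frag.length + 1))) := by
        rw [show posA ('A' :: (frag ++ 'A' :: r))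
            = 0 :: (posA (frag ++ 'A' :: r)).map (· + 1) by simp [posA]]
        rw [posA_free_append frag hnf ('A' :: r), List.map_map]
        rw [List.cons.injEq]
        refine ⟨rfl, ?_⟩
        apply List.map_congr_left
        intro a _
        simp only [Function.comp_apply]
        omega
      have hY : (posA ('A' :: r)).map (· + (frag.length + 1))
          = (frag.length + 1) :: ((posA r).map (· + 1)).map (· + (frag.length + 1)) := by
        rw [hX]; simp
      have hseg : segsOf ('A' :: (frag ++ 'A' :: r)) = wrapC frag :: segsOf ('A' :: r) := by
        unfold segsOf
        rw [hpos, List.tail_cons, hY, zip_zero_cons, ← hY, List.map_cons, zip_shift]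
        rw [List.cons.injEq]
        constructor
        · simp only [List.drop_zero, Nat.sub_zero, wrapC]
          rw [show ('A' :: (frag ++ 'A' :: r)) = ('A' :: frag) ++ ('A' :: r) by simp]
          rw [List.take_append]
          simp only [List.length_cons]
          rw [List.take_of_length_le (by simp),
            show frag.length + 1 + 1 - (frag.length + 1) = 1 by omega]
          simp
        · rw [show ('A' :: (frag ++ 'A' :: r)) = ('A' :: frag) ++ ('A' :: r) by simp,
            List.drop_left' (by simp)]
      rw [hseg]
    · rw [fSplit_nofree l hA []]
      simp only [List.reverse_nil, List.nil_append, List.dropLast_singleton, List.map_nil]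
      simp [segsOf, posA, posA_eq_nil l hA]

lemma main_segs (s : List Char) :
    (((fSplit s []).drop 1).dropLast).map wrapC = segsOf s := by
  by_cases hA : 'A' ∈ s
  · obtain ⟨frag, r, rfl, hnf⟩ := split_at_A s hA
    rw [fSplit_free frag hnf r []]
    simp only [List.reverse_nil, List.nil_append, List.drop_succ_cons, List.drop_zero]
    rw [ahead r.length r (le_refl _)]
    exact (segsOf_free_append frag hnf ('A' :: r)).symm
  · rw [fSplit_nofree s hA []]
    simp only [List.reverse_nil, List.nil_append, List.drop_succ_cons, List.drop_nil,
      List.dropLast_nil, List.map_nil]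
    simp [segsOf, posA_eq_nil s hA]


lemma posA_mapcast : ∀ (l : List Char) (k : Int),
    ((PySem.List.enumerate l k).filter (fun p => p.2 == 'A')).map (·.1)
    = (posA l).map (fun n : Nat => (n : Int) + k) := by
  intro l
  induction l with
  | nil => intro k; simp [PySem.List.enumerate, posA]
  | cons c rest ih =>
    intro k
    by_cases hc : c = 'A'
    · simp only [PySem.List.enumerate_cons, posA, hc, if_true, List.filter_cons]
      simp only [show (('A' == 'A') = true) from rfl, if_true, List.map_cons, ih (k + 1), List.map_map]
      rw [List.cons.injEq]
      refine ⟨by simp, ?_⟩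
      apply List.map_congr_left
      intro a _
      simp only [Function.comp_apply]
      push_cast
      ring
    · have hc' : (c == 'A') = false := by simp [hc]
      simp only [PySem.List.enumerate_cons, posA, hc, if_false, List.filter_cons, hc',
        Bool.false_eq_true, ih (k + 1), List.map_map]
      apply List.map_congr_left
      intro a _
      simp only [Function.comp_apply]
      push_cast
      ring

lemma slice_one_negone {α : Type} (xs : List α) :
    PySem.List.slice xs (some 1) (some (-1)) = (xs.drop 1).dropLast := by
  cases xs with
  | nil => simp [PySem.List.slice]
  | cons x l =>
    simp only [PySem.List.slice, List.length_cons, PySem.List.clampIdx_neg_one]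
    rw [show ((1 : Int)) = ((1 : Nat) : Int) by norm_num, PySem.List.clampIdx_natCast]
    rw [List.dropLast_eq_take]
    simp


lemma portA_eq (s : String) : get_count_dict s
    = (PySem.Dict.counter ((((fSplit s.toList []).drop 1).dropLast).map (fun p => String.ofList (wrapC p)))).items := by
  unfold get_count_dict
  dsimp only
  have hsplit : (PySem.Str.split? s "A").getD []
      = ((fSplit s.toList []).map String.ofList) := by
    simp [PySem.Str.split?, PySem.Chars.split?, splitOn_eq_fSplit,
      show ("A" : String).toList = ['A'] from rfl]
  rw [hsplit, slice_one_negone, ← List.map_drop, ← List.map_dropLast, List.foldl_map]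
  have hkey : ∀ p : List Char, ("A" ++ String.ofList p ++ "A") = String.ofList (wrapC p) := by
    intro p
    rw [show wrapC p = ['A'] ++ (p ++ ['A']) by simp [wrapC], String.ofList_append,
      String.ofList_append]
    rfl
  have hstep : ∀ (d : PySem.Dict String Int) (k : String),
      (match d.get? k with
       | some v => d.insert k (v + 1)
       | none => d.insert k 1) = d.insert k (d.getD k 0 + 1) := by
    intro d k
    cases h : d.get? k <;> simp [PySem.Dict.getD, h]
  have hfold : ∀ (F : List (List Char)),
      F.foldl (fun count_dict p =>
          match count_dict.get? ("A" ++ String.ofList p ++ "A") with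
          | some v => count_dict.insert ("A" ++ String.ofList p ++ "A") (v + 1)
          | none => count_dict.insert ("A" ++ String.ofList p ++ "A") 1)
        (PySem.Dict.empty : PySem.Dict String Int)
      = PySem.Dict.counter (F.map (fun p => String.ofList (wrapC p))) := by
    intro F
    rw [← PySem.Dict.foldl_insert_getD_add_one_eq_counter, List.foldl_map]
    apply PySem.List.foldl_congr_mem
    intro d p _
    rw [hstep, hkey]
  rw [hfold]


lemma portB_eq (s : String) : get_count_dict_alt s
    = (PySem.Dict.counter ((segsOf s.toList).map String.ofList)).items := by
  unfold get_count_dict_alt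
  dsimp only
  rw [posA_mapcast s.toList 0, PySem.List.slice_from_one]
  simp only [add_zero]
  rw [← List.map_tail, List.zip_map, List.foldl_map]
  have hseg : ∀ (p : Nat × Nat),
      PySem.Str.slice s (some ((p.1 : Int))) (some ((p.2 : Int) + 1))
      = String.ofList ((s.toList.drop p.1).take (p.2 + 1 - p.1)) := by
    intro p
    rw [← String.ofList_toList (s := PySem.Str.slice s (some ((p.1 : Int))) (some ((p.2 : Int) + 1)))]
    rw [PySem.Str.toList_slice, PySem.Chars.slice_eq_listSlice,
      show ((p.2 : Int) + 1) = (((p.2 + 1 : Nat)) : Int) by push_cast; ring,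
      PySem.List.slice_natCast]
  rw [PySem.List.foldl_congr_mem _ _
      (fun (x : PySem.Dict String Int) (y : Nat × Nat) =>
        x.insert (String.ofList ((s.toList.drop y.1).take (y.2 + 1 - y.1)))
          (x.getD (String.ofList ((s.toList.drop y.1).take (y.2 + 1 - y.1))) 0 + 1)) _
      (by
        intro d p _
        simp only [Prod.map_fst, Prod.map_snd]
        rw [hseg p])]
  rw [← List.foldl_map
      (f := fun y : Nat × Nat => String.ofList ((s.toList.drop y.1).take (y.2 + 1 - y.1)))
      (g := fun (d : PySem.Dict String Int) (k : String) => d.insert k (d.getD k 0 + 1)),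
    PySem.Dict.foldl_insert_getD_add_one_eq_counter]
  congr 1
  simp only [segsOf, List.map_map]
  rfl


-- ===== VERDICT (by name: the statement is the Claim_ definition above) =====
theorem get_count_dict_spec : Claim_equal_get_count_dict := by
  intro s _
  unfold Spec_get_count_dict
  rw [portA_eq, portB_eq, ← main_segs, List.map_map]
  rfl
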